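-- pv_equiv track=rewrite | github.com/CSU-KangHu/NeuralTE | src/Util.py | has_polyA_or_polyT_near_tail
-- ===== SOURCE A (Python) =====
-- def has_polyA_or_polyT_near_tail(sequence, poly_length=6, max_mismatches=1, max_distance_from_tail=5):
--     """
--     检查序列尾部是否存在 polyA 或 polyT 序列，并且这些序列离序列尾部的距离不超过 max_distance_from_tail，
--     容许最多 max_mismatches 个错配。
--
--     :param sequence: 要检查的序列（字符串）
--     :param poly_length: polyA 或 polyT 序列的长度，默认为5
--     :param max_mismatches: 允许的最大错配数，默认为1
--     :param max_distance_from_tail: polyA 或 polyT 离尾部的最大距离，默认为5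
--     :return: 如果尾部存在符合条件的 polyA 或 polyT 序列返回True，否则返回False
--     """
--     sequence_length = len(sequence)
--     tail_start = max(0, sequence_length - poly_length - max_distance_from_tail)
--     polyA = 'A' * poly_length
--     polyT = 'T' * poly_length
--
--     for i in range(tail_start, sequence_length - poly_length + 1):
--         segment = sequence[i:i + poly_length]
--         mismatches_A = sum(1 for a, b in zip(segment, polyA) if a != b)
--         mismatches_T = sum(1 for a, b in zip(segment, polyT) if a != b)
--         if mismatches_A <= max_mismatches or mismatches_T <= max_mismatches:
--             return True
--     return False
-- ===== SOURCE B (Python) =====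
-- def has_polyA_or_polyT_near_tail(sequence, poly_length=6, max_mismatches=1, max_distance_from_tail=5):
--     n = len(sequence)
--     start = max(0, n - poly_length - max_distance_from_tail)
--     end = n - poly_length              # last valid window start
--     if end < start:
--         return False
--     L = max(0, poly_length)            # number of compared characters per window
--     need = L - max_mismatches          # minimal number of matching characters
--     if L == 0:
--         return 0 >= need               # empty pattern: every window matches trivially
--     window = sequence[start:start + L]
--     countA = window.count('A')
--     countT = window.count('T')
--     if countA >= need or countT >= need:
--         return True
--     for i in range(start + 1, end + 1):
--         out = sequence[i - 1]
--         inc = sequence[i + L - 1]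
--         countA += (inc == 'A') - (out == 'A')
--         countT += (inc == 'T') - (out == 'T')
--         if countA >= need or countT >= need:
--             return True
--     return False
-- ===== Notes on version B (the rewrite author's own statement) =====
-- stated objective: faster
-- what changed: Replaces the per-window recomputation of mismatches against materialised polyA/polyT pattern strings by a single sliding window that maintains running counts of the two poly bases, updated in O(1) per position (mismatches = window length - matches).
import Mathlib
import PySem

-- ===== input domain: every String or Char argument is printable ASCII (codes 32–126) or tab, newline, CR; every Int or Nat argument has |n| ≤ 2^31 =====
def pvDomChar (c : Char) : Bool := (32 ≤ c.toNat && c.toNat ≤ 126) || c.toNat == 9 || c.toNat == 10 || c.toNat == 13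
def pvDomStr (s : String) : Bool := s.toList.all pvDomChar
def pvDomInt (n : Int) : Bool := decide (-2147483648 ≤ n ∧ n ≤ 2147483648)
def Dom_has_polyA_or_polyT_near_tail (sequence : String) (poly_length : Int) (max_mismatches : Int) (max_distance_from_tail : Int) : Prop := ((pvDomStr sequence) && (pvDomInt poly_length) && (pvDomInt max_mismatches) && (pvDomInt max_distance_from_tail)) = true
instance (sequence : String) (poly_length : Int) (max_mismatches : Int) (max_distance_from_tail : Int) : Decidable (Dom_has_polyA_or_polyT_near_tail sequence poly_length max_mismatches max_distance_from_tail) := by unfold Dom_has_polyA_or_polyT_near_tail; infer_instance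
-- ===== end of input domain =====

-- B replaces A's per-window mismatch recomputation by one sliding window with running
-- counts of the two poly bases (objective: faster; O(1) work per window position).

-- ===== PORT A =====
-- literal transliteration of A: build polyA/polyT, scan each window start, count mismatches by zip
def has_polyA_or_polyT_near_tail (sequence : String) (poly_length : Int) (max_mismatches : Int) (max_distance_from_tail : Int) : Bool :=
  let s := sequence.toList
  let sequence_length : Int := s.length
  let tail_start : Int := max 0 (sequence_length - poly_length - max_distance_from_tail)
  let polyA : List Char := List.replicate poly_length.toNat 'A'
  let polyT : List Char := List.replicate poly_length.toNat 'T'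
  (PySem.List.pyRange tail_start (sequence_length - poly_length + 1) 1).any (fun i =>
    let segment := PySem.List.slice s (some i) (some (i + poly_length))
    let mismatches_A : Int := ((segment.zip polyA).countP (fun p => p.1 != p.2) : Nat)
    let mismatches_T : Int := ((segment.zip polyT).countP (fun p => p.1 != p.2) : Nat)
    decide (mismatches_A ≤ max_mismatches) || decide (mismatches_T ≤ max_mismatches))

-- ===== PORT B =====
-- the sliding loop of Source B; s[i-1] / s[i+L-1] are always in range at every call site (proved below)
def pvAltLoop (s : List Char) (L need : Int) (cA cT : Int) : List Int → Bool
  | [] => false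
  | i :: rest =>
    let outc := PySem.List.pyGetD s (i - 1) ' '
    let inc := PySem.List.pyGetD s (i + L - 1) ' '
    let cA' := cA + (if inc = 'A' then (1:Int) else 0) - (if outc = 'A' then (1:Int) else 0)
    let cT' := cT + (if inc = 'T' then (1:Int) else 0) - (if outc = 'T' then (1:Int) else 0)
    if cA' ≥ need ∨ cT' ≥ need then true else pvAltLoop s L need cA' cT' rest

def has_polyA_or_polyT_near_tail_alt (sequence : String) (poly_length : Int) (max_mismatches : Int) (max_distance_from_tail : Int) : Bool :=
  let s := sequence.toList
  let n : Int := s.length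
  let start : Int := max 0 (n - poly_length - max_distance_from_tail)
  let endi : Int := n - poly_length
  if endi < start then false
  else
    let L : Int := max 0 poly_length
    let need : Int := L - max_mismatches
    if L = 0 then decide ((0:Int) ≥ need)
    else
      let window := PySem.List.slice s (some start) (some (start + L))
      let countA : Int := window.count 'A'
      let countT : Int := window.count 'T'
      if countA ≥ need ∨ countT ≥ need then true
      else pvAltLoop s L need countA countT (PySem.List.pyRange (start + 1) (endi + 1) 1)

-- ===== PRECONDITION & SPEC =====
def Spec_has_polyA_or_polyT_near_tail (sequence : String) (poly_length : Int) (max_mismatches : Int) (max_distance_from_tail : Int) (out : Bool) : Prop := out = has_polyA_or_polyT_near_tail_alt sequence poly_length max_mismatches max_distance_from_tail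
instance (sequence : String) (poly_length : Int) (max_mismatches : Int) (max_distance_from_tail : Int) (out : Bool) : Decidable (Spec_has_polyA_or_polyT_near_tail sequence poly_length max_mismatches max_distance_from_tail out) := by unfold Spec_has_polyA_or_polyT_near_tail; infer_instance

-- ===== CLAIM (what is proved, stated in full; the proofs are below) =====
def Claim_equal_has_polyA_or_polyT_near_tail : Prop := ∀ (sequence : String) (poly_length : Int) (max_mismatches : Int) (max_distance_from_tail : Int), Dom_has_polyA_or_polyT_near_tail sequence poly_length max_mismatches max_distance_from_tail → Spec_has_polyA_or_polyT_near_tail sequence poly_length max_mismatches max_distance_from_tail (has_polyA_or_polyT_near_tail sequence poly_length max_mismatches max_distance_from_tail)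

-- ===== LEMMAS AND PROOFS =====

-- window of length k starting at Int index i (the common value both programs scan)
def pvWin (s : List Char) (i : Int) (k : Nat) : List Char := (s.drop i.toNat).take k

-- B's per-window test, as a predicate on the window start
def pvP (s : List Char) (k : Nat) (need : Int) (i : Int) : Bool :=
  decide ((((pvWin s i k).count 'A' : Int) ≥ need) ∨ (((pvWin s i k).count 'T' : Int) ≥ need))

-- A's mismatch count against 'c'*k is (window length) - (count of c): zip-with-replicate bookkeeping
theorem pvMismatch (l : List Char) (k : Nat) (a : Char) :
    (l.zip (List.replicate k a)).countP (fun p => p.1 != p.2) + (l.take k).count a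
      = (l.take k).length := by
  induction l generalizing k with
  | nil => simp
  | cons c t ih =>
    cases k with
    | zero => simp
    | succ m =>
      rw [List.replicate_succ, List.zip_cons_cons, List.countP_cons, List.take_succ_cons,
        List.count_cons, List.length_cons]
      have h := ih m
      have hb : (c != a) = !(c == a) := rfl
      cases hbeq : c == a <;> simp [hb, hbeq] at h ⊢ <;> omega

-- sliding one step: counts in window j+1 vs window j (Nat form)
theorem pvSlide (s : List Char) (j k : Nat) (hk : 0 < k) (h : j + 1 + k ≤ s.length) (a : Char) :
    ((s.drop (j+1)).take k).count a + (if s.getD j ' ' = a then 1 else 0)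
      = ((s.drop j).take k).count a + (if s.getD (j+k) ' ' = a then 1 else 0) := by
  obtain ⟨m, rfl⟩ : ∃ m, k = m + 1 := ⟨k - 1, by omega⟩
  have hjk : s.getD (j+(m+1)) ' ' = s[j+(m+1)]'(by omega) := List.getD_eq_getElem s ' ' (by omega)
  have hdrop : s.drop j = s.getD j ' ' :: s.drop (j+1) := by
    rw [List.getD_eq_getElem s ' ' (by omega)]
    exact List.drop_eq_getElem_cons (by omega)
  have hget : (s.drop (j+1))[m]? = some (s.getD (j+(m+1)) ' ') := by
    rw [List.getElem?_drop, hjk]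
    have hidx : j + 1 + m = j + (m+1) := by omega
    rw [hidx]
    exact List.getElem?_eq_getElem (by omega)
  rw [List.take_add_one, List.count_append, hget, hdrop, List.take_succ_cons, List.count_cons]
  simp only [Option.toList_some, List.count_cons, List.count_nil, beq_iff_eq]
  split_ifs <;> omega

-- any over a constant predicate
theorem pvAnyConst (l : List Int) (b : Bool) : (l.any fun _ => b) = (decide (l ≠ []) && b) := by
  induction l with
  | nil => simp
  | cons x t ih => cases b <;> simp_all

-- A's per-window check equals B's count test, on full windows
theorem pvApredEq (s : List Char) (pl mm : Int) (hpl : 0 < pl) (i : Int)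
    (h0 : 0 ≤ i) (hub : i + pl ≤ (s.length : Int)) :
    (decide ((((PySem.List.slice s (some i) (some (i + pl))).zip (List.replicate pl.toNat 'A')).countP (fun p => p.1 != p.2) : Int) ≤ mm)
      || decide ((((PySem.List.slice s (some i) (some (i + pl))).zip (List.replicate pl.toNat 'T')).countP (fun p => p.1 != p.2) : Int) ≤ mm))
      = pvP s pl.toNat (pl - mm) i := by
  have hsl : PySem.List.slice s (some i) (some (i + pl)) = pvWin s i pl.toNat := by
    rw [PySem.List.slice_toNat s h0 (by omega)]
    unfold pvWin
    congr 1
    omega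
  have hlen : (pvWin s i pl.toNat).length = pl.toNat := by
    unfold pvWin
    rw [List.length_take, List.length_drop]
    omega
  have htake : (pvWin s i pl.toNat).take pl.toNat = pvWin s i pl.toNat :=
    List.take_of_length_le (by omega)
  have hA := pvMismatch (pvWin s i pl.toNat) pl.toNat 'A'
  have hT := pvMismatch (pvWin s i pl.toNat) pl.toNat 'T'
  rw [htake, hlen] at hA hT
  rw [hsl, pvP]
  rw [Bool.eq_iff_iff, Bool.or_eq_true, decide_eq_true_iff, decide_eq_true_iff, decide_eq_true_iff]
  omega

-- the loop of B computes 'any pvP' over the remaining window starts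
theorem pvLoopEq (s : List Char) (k : Nat) (hk : 0 < k) (need : Int) :
    ∀ (m : Nat) (j : Nat), j + m + k ≤ s.length →
      pvAltLoop s (k : Int) need ((pvWin s (j : Int) k).count 'A' : Int) ((pvWin s (j : Int) k).count 'T' : Int)
          (PySem.List.pyRange ((j : Int) + 1) ((j : Int) + 1 + (m : Int)) 1)
        = (PySem.List.pyRange ((j : Int) + 1) ((j : Int) + 1 + (m : Int)) 1).any (pvP s k need) := by
  intro m
  induction m with
  | zero =>
    intro j _
    rw [PySem.List.pyRange_one_eq_nil (by omega)]
    simp [pvAltLoop]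
  | succ m ih =>
    intro j hj
    have hcons : PySem.List.pyRange ((j : Int) + 1) ((j : Int) + 1 + ((m : Nat) + 1 : Nat)) 1
        = ((j : Int) + 1) :: PySem.List.pyRange ((j : Int) + 1 + 1) ((j : Int) + 1 + ((m : Nat) + 1 : Nat)) 1 :=
      PySem.List.pyRange_one_cons (by push_cast; omega)
    rw [hcons]
    simp only [pvAltLoop, List.any_cons]
    have hout : PySem.List.pyGetD s ((j : Int) + 1 - 1) ' ' = s.getD j ' ' := by
      rw [show (j : Int) + 1 - 1 = ((j : Nat) : Int) by omega]
      simp [PySem.List.pyGetD_natCast]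
    have hin : PySem.List.pyGetD s ((j : Int) + 1 + (k : Int) - 1) ' ' = s.getD (j + k) ' ' := by
      rw [show (j : Int) + 1 + (k : Int) - 1 = (Nat.cast (j + k) : Int) by push_cast; omega,
        PySem.List.pyGetD_natCast]
    rw [hout, hin]
    have hslA := pvSlide s j k hk (by omega) 'A'
    have hslT := pvSlide s j k hk (by omega) 'T'
    have hwj1 : pvWin s ((j : Int) + 1) k = (s.drop (j + 1)).take k := by
      unfold pvWin
      rw [show ((j : Int) + 1).toNat = j + 1 by omega]
    have hwj : pvWin s ((j : Int)) k = (s.drop j).take k := by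
      unfold pvWin
      rw [Int.toNat_natCast]
    have hcA : (((pvWin s ((j : Int)) k).count 'A' : Int)
          + (if s.getD (j + k) ' ' = 'A' then (1:Int) else 0) - (if s.getD j ' ' = 'A' then (1:Int) else 0))
        = ((pvWin s ((j : Int) + 1) k).count 'A' : Int) := by
      rw [hwj1, hwj]
      split_ifs at hslA ⊢ <;> omega
    have hcT : (((pvWin s ((j : Int)) k).count 'T' : Int)
          + (if s.getD (j + k) ' ' = 'T' then (1:Int) else 0) - (if s.getD j ' ' = 'T' then (1:Int) else 0))
        = ((pvWin s ((j : Int) + 1) k).count 'T' : Int) := by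
      rw [hwj1, hwj]
      split_ifs at hslT ⊢ <;> omega
    rw [hcA, hcT]
    by_cases hcond : (((pvWin s ((j : Int) + 1) k).count 'A' : Int) ≥ need ∨ ((pvWin s ((j : Int) + 1) k).count 'T' : Int) ≥ need)
    · rw [if_pos hcond]
      have : pvP s k need ((j : Int) + 1) = true := by
        rw [pvP, decide_eq_true_iff]
        exact hcond
      rw [this]
      simp
    · rw [if_neg hcond]
      have hp : pvP s k need ((j : Int) + 1) = false := by
        rw [pvP, decide_eq_false_iff_not]
        exact hcond
      rw [hp, Bool.false_or]
      have harg : (j : Int) + 1 + 1 = (((j + 1 : Nat) : Int)) + 1 := by push_cast; ring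
      have harg2 : (j : Int) + 1 + ((m : Nat) + 1 : Nat) = (((j + 1 : Nat) : Int)) + 1 + (m : Int) := by
        push_cast; ring
      rw [harg, harg2]
      exact ih (j + 1) (by omega)

-- a full-window slice is pvWin
theorem pvSliceWin (s : List Char) (i pl : Int) (h0 : 0 ≤ i) (hpl : 0 ≤ pl) :
    PySem.List.slice s (some i) (some (i + pl)) = pvWin s i pl.toNat := by
  rw [PySem.List.slice_toNat s h0 (by omega)]
  unfold pvWin
  congr 1
  omega

theorem has_polyA_or_polyT_near_tail_equiv (sequence : String) (poly_length max_mismatches max_distance_from_tail : Int) :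
    has_polyA_or_polyT_near_tail sequence poly_length max_mismatches max_distance_from_tail
      = has_polyA_or_polyT_near_tail_alt sequence poly_length max_mismatches max_distance_from_tail := by
  simp only [has_polyA_or_polyT_near_tail, has_polyA_or_polyT_near_tail_alt]
  set s := sequence.toList with hs
  set pl := poly_length
  set mm := max_mismatches
  set start := max 0 ((s.length : Int) - pl - max_distance_from_tail) with hstart
  have hstart0 : (0 : Int) ≤ start := le_max_left _ _
  by_cases hlt : (s.length : Int) - pl < start
  · rw [if_pos hlt, PySem.List.pyRange_one_eq_nil (by omega)]
    simp
  · rw [if_neg hlt]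
    rw [not_lt] at hlt
    by_cases hpl : pl ≤ 0
    · have hL : max 0 pl = 0 := by omega
      rw [hL, if_pos rfl]
      have hk0 : pl.toNat = 0 := by omega
      have hne : PySem.List.pyRange start ((s.length : Int) - pl + 1) 1 ≠ [] := by
        rw [PySem.List.pyRange_one_cons (by omega)]
        simp
      simp only [hk0, List.replicate_zero, List.zip_nil_right, List.countP_nil, Nat.cast_zero,
        Bool.or_self]
      rw [pvAnyConst]
      rw [decide_eq_true hne, Bool.true_and, decide_eq_decide]
      omega
    · rw [not_le] at hpl
      have hL : max 0 pl = pl := by omega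
      rw [hL, if_neg (by omega)]
      have hkpl : (pl.toNat : Int) = pl := by omega
      -- A side: pointwise convert the zip-mismatch test into the count test
      have hA : (PySem.List.pyRange start ((s.length : Int) - pl + 1) 1).any (fun i =>
            (decide ((((PySem.List.slice s (some i) (some (i + pl))).zip (List.replicate pl.toNat 'A')).countP (fun p => p.1 != p.2) : Int) ≤ mm)
              || decide ((((PySem.List.slice s (some i) (some (i + pl))).zip (List.replicate pl.toNat 'T')).countP (fun p => p.1 != p.2) : Int) ≤ mm)))
          = (PySem.List.pyRange start ((s.length : Int) - pl + 1) 1).any (pvP s pl.toNat (pl - mm)) := by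
        apply PySem.List.any_congr_mem
        intro i hi
        rw [PySem.List.mem_pyRange_one] at hi
        exact pvApredEq s pl mm hpl i (by omega) (by omega)
      rw [hA]
      rw [PySem.List.pyRange_one_cons (by omega), List.any_cons]
      -- B side: the window slice is pvWin, the loop is 'any pvP'
      rw [pvSliceWin s start pl hstart0 (by omega)]
      have hloop : pvAltLoop s pl (pl - mm) ((pvWin s start pl.toNat).count 'A' : Int)
            ((pvWin s start pl.toNat).count 'T' : Int)
            (PySem.List.pyRange (start + 1) ((s.length : Int) - pl + 1) 1)
          = (PySem.List.pyRange (start + 1) ((s.length : Int) - pl + 1) 1).any (pvP s pl.toNat (pl - mm)) := by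
        have hj : ((start.toNat : Nat) : Int) = start := Int.toNat_of_nonneg hstart0
        have h0 := pvLoopEq s pl.toNat (by omega) (pl - mm) (((s.length : Int) - pl - start).toNat) start.toNat (by omega)
        rw [hkpl, hj] at h0
        rw [show start + 1 + (((((s.length : Int) - pl - start).toNat) : Nat) : Int) = (s.length : Int) - pl + 1 by omega] at h0
        exact h0
      by_cases hc : (((pvWin s start pl.toNat).count 'A' : Int) ≥ pl - mm ∨ ((pvWin s start pl.toNat).count 'T' : Int) ≥ pl - mm)
      · rw [if_pos hc]
        have : pvP s pl.toNat (pl - mm) start = true := by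
          rw [pvP, decide_eq_true_iff]
          exact hc
        rw [this, Bool.true_or]
      · rw [if_neg hc]
        have hp : pvP s pl.toNat (pl - mm) start = false := by
          rw [pvP, decide_eq_false_iff_not]
          exact hc
        rw [hp, Bool.false_or, hloop]

-- ===== VERDICT (by name: the statement is the Claim_ definition above) =====
theorem has_polyA_or_polyT_near_tail_spec : Claim_equal_has_polyA_or_polyT_near_tail := by
  intro sequence pl mm md _
  exact has_polyA_or_polyT_near_tail_equiv sequence pl mm md
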